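-- pv_equiv track=rewrite | github.com/atolat/algorithms-lc | Strings-Arrays/longest-substring-without-3-chars.py | longestSubs
-- ===== SOURCE A (Python) =====
-- def longestSubs(s):
--     curr = 0
--     end = 1
--     c = s[0]
--     count = 1
--     maxLen = 1
--     start = 0
--
--     while end < len(s):
--         if s[end] == c:
--             count += 1
--
--             if count == 2:
--                 if end - curr + 1 > maxLen:
--                     maxLen = end - curr + 1
--                     start = curr
--             else :
--                 curr = end - 1
--
--         else:
--             c = s[end]
--             count = 1
--             if end - curr + 1 > maxLen:
--                 maxLen = end - curr + 1
--                 start = curr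
--         end += 1
--
--     return s[start:start+maxLen]
-- ===== SOURCE B (Python) =====
-- def longestSubs(s):
--     # Two-phase algorithm: (1) run-length encode s as (start, length) pairs,
--     # (2) scan the run list: a maximal valid block ends 2 chars into a "long"
--     # run (length >= 3), and the next block starts at that run's last 2 chars.
--     runs = []
--     prev = None
--     i = 0
--     for ch in s:
--         if ch == prev:
--             st, l = runs[-1]
--             runs[-1] = (st, l + 1)
--         else:
--             runs.append((i, 1))
--         prev = ch
--         i += 1
--     n = len(s)
--     start, maxLen = 0, 1
--     segStart = 0
--     for (p, l) in runs:
--         if l >= 3: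
--             if p + 2 - segStart > maxLen:
--                 maxLen = p + 2 - segStart
--                 start = segStart
--             segStart = p + l - 2
--     if n - segStart > maxLen:
--         maxLen = n - segStart
--         start = segStart
--     return s[start:start + maxLen]
-- ===== Notes on version B (the rewrite author's own statement) =====
-- stated objective: alternative
-- what changed: Replaces A's single-pass char/run-count state machine by a two-phase algorithm: first run-length encode the string into (start,length) pairs, then scan the run list, cutting a candidate block two chars into each run of length >= 3 and taking one final end-of-string candidate; A's per-character strict-improvement updates are absorbed by B's per-segment updates.
import Mathlib
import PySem

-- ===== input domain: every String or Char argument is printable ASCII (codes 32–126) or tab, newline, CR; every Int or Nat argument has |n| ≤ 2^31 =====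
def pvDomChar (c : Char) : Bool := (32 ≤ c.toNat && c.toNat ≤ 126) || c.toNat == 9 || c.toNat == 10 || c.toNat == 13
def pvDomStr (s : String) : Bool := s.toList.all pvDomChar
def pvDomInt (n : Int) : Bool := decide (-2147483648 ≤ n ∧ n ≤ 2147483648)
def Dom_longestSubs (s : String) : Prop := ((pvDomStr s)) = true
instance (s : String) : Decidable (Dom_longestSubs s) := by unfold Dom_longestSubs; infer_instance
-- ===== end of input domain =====

-- B replaces A's single-pass char/run-count state machine by a two-phase algorithm:
-- run-length encode the string, then scan the run list (alternative decomposition, same cost).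


-- ===== PORT A =====
-- A's while-loop: state (curr, c, count, maxLen, start, endIdx), one step per char s[endIdx]
def longestSubsLoopA : List Char → Int → Char → Int → Int → Int → Int → Int × Int
  | [], _, _, _, maxLen, start, _ => (start, maxLen)
  | ch :: rest, curr, c, count, maxLen, start, endIdx =>
    if ch = c then
      if count + 1 = 2 then
        if endIdx - curr + 1 > maxLen then
          longestSubsLoopA rest curr c (count + 1) (endIdx - curr + 1) curr (endIdx + 1)
        else
          longestSubsLoopA rest curr c (count + 1) maxLen start (endIdx + 1)
      else
        longestSubsLoopA rest (endIdx - 1) c (count + 1) maxLen start (endIdx + 1)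
    else
      if endIdx - curr + 1 > maxLen then
        longestSubsLoopA rest curr ch 1 (endIdx - curr + 1) curr (endIdx + 1)
      else
        longestSubsLoopA rest curr ch 1 maxLen start (endIdx + 1)

def longestSubs (s : String) : String :=
  match s.toList with
  | [] => ""   -- Python raises IndexError at s[0]; excluded by Pre_longestSubs
  | c0 :: rest =>
    let r := longestSubsLoopA rest 0 c0 1 1 0 1
    PySem.Str.slice s (some r.1) (some (r.1 + r.2))

-- ===== PORT B =====
-- B's first for-loop: build the run-length encoding [(start index, run length), …];
-- the list is accumulated in reverse ('runs[-1]' is the head) and reversed at the end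
def pvBuildRuns : List Char → Option Char → Int → List (Int × Int) → List (Int × Int)
  | [], _, _, acc => acc.reverse
  | ch :: rest, prev, i, acc =>
    if some ch = prev then
      match acc with
      | (st, l) :: t => pvBuildRuns rest (some ch) (i + 1) ((st, l + 1) :: t)
      | [] => pvBuildRuns rest (some ch) (i + 1) acc   -- unreachable: prev set ⇒ runs ≠ []
    else pvBuildRuns rest (some ch) (i + 1) ((i, 1) :: acc)

-- B's second for-loop, over the runs: state (segStart, start, maxLen)
def pvScanRuns : List (Int × Int) → Int → Int → Int → Int × Int × Int
  | [], seg, st, ml => (seg, st, ml)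
  | (p, l) :: rs, seg, st, ml =>
    if 3 ≤ l then
      if p + 2 - seg > ml then pvScanRuns rs (p + l - 2) seg (p + 2 - seg)
      else pvScanRuns rs (p + l - 2) st ml
    else pvScanRuns rs seg st ml

def longestSubs_alt (s : String) : String :=
  let cs := s.toList
  let n : Int := cs.length
  let runs := pvBuildRuns cs none 0 []
  let r := pvScanRuns runs 0 0 1
  let fin := if n - r.1 > r.2.2 then (r.1, n - r.1) else (r.2.1, r.2.2)
  PySem.Str.slice s (some fin.1) (some (fin.1 + fin.2))

-- ===== PRECONDITION & SPEC =====
-- Pre_ excludes only the empty string, on which Python A raises IndexError at s[0].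
def Pre_longestSubs (s : String) : Prop := s ≠ ""
instance (s : String) : Decidable (Pre_longestSubs s) := by unfold Pre_longestSubs; infer_instance
def pvWitness_longestSubs : String := "abba"

def Spec_longestSubs (s : String) (out : String) : Prop := out = longestSubs_alt s
instance (s : String) (out : String) : Decidable (Spec_longestSubs s out) := by unfold Spec_longestSubs; infer_instance

-- ===== CLAIM (what is proved, stated in full; the proofs are below) =====
def Claim_equal_longestSubs : Prop :=
  ∀ (s : String), Dom_longestSubs s → Pre_longestSubs s → Spec_longestSubs s (longestSubs s)

-- ===== LEMMAS AND PROOFS =====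

-- strict-improvement update of the pair (start, maxLen) with candidate start s0, length L
def upd (M : Int × Int) (s0 L : Int) : Int × Int := if L > M.2 then (s0, L) else M

-- the end-of-string update B performs after the run scan (N = total length)
def finalUpd (r : Int × Int × Int) (N : Int) : Int × Int := upd (r.2.1, r.2.2) r.1 (N - r.1)

lemma upd_upd (M : Int × Int) (s0 a b : Int) (hab : a ≤ b) :
    upd (upd M s0 a) s0 b = upd M s0 b := by
  unfold upd
  split_ifs <;> simp_all <;> omega

lemma upd_id (M : Int × Int) (s0 L : Int) (h : L ≤ M.2) : upd M s0 L = M := by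
  unfold upd
  rw [if_neg (by omega)]

lemma upd_snd_ge (M : Int × Int) (s0 L : Int) : M.2 ≤ (upd M s0 L).2 ∧ L ≤ (upd M s0 L).2 := by
  unfold upd
  split_ifs with h
  · exact ⟨le_of_lt h, le_refl _⟩
  · exact ⟨le_refl _, by omega⟩

-- (proof-side helpers) structural description of the leading run of a list
def pvSpanRun (c : Char) : List Char → Int → Int × List Char
  | [], l => (l, [])
  | x :: xs, l => if x = c then pvSpanRun c xs (l + 1) else (l, x :: xs)

lemma pvSpanRun_length_le (c : Char) : ∀ (xs : List Char) (l : Int),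
    (pvSpanRun c xs l).2.length ≤ xs.length := by
  intro xs
  induction xs with
  | nil => intro l; simp [pvSpanRun]
  | cons x t ih =>
    intro l
    by_cases h : x = c
    · simpa [pvSpanRun, h] using Nat.le_succ_of_le (ih (l + 1))
    · simp [pvSpanRun, h]

-- (proof-side) the run-length encoding, one run at a time
def pvRunsAux : List Char → Int → List (Int × Int)
  | [], _ => []
  | ch :: rest, i =>
    let r := pvSpanRun ch rest 1
    (i, r.1) :: pvRunsAux r.2 (i + r.1)
termination_by cs _ => cs.length
decreasing_by
  exact Nat.lt_succ_of_le (pvSpanRun_length_le ch rest 1)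

-- pvSpanRun c xs l returns l + (length of the leading c-run of xs) and the remainder after it
lemma pvSpanRun_spec (c : Char) : ∀ (xs : List Char) (l : Int),
    ∃ (k : Nat) (rest' : List Char),
      pvSpanRun c xs l = (l + (k : Int), rest') ∧
      xs = List.replicate k c ++ rest' ∧
      (rest' = [] ∨ ∃ y ys, rest' = y :: ys ∧ y ≠ c) := by
  intro xs
  induction xs with
  | nil => intro l; exact ⟨0, [], by simp [pvSpanRun], by simp, Or.inl rfl⟩
  | cons x t ih =>
    intro l
    by_cases h : x = c
    · obtain ⟨k, rest', h1, h2, h3⟩ := ih (l + 1)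
      refine ⟨k + 1, rest', ?_, ?_, h3⟩
      · rw [pvSpanRun, if_pos h, h1]; congr 1; push_cast; ring
      · subst h; rw [List.replicate_succ]; simp [h2]
    · exact ⟨0, x :: t, by simp [pvSpanRun, h], by simp, Or.inr ⟨x, t, rfl, h⟩⟩

-- B's run builder across a block of equal characters: it only extends the head run
lemma build_ext (c : Char) : ∀ (k : Nat) (rest : List Char) (i st l : Int)
    (acc : List (Int × Int)),
    pvBuildRuns (List.replicate k c ++ rest) (some c) i ((st, l) :: acc)
      = pvBuildRuns rest (some c) (i + (k : Int)) ((st, l + (k : Int)) :: acc) := by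
  intro k
  induction k with
  | zero => intro rest i st l acc; simp
  | succ k ih =>
    intro rest i st l acc
    rw [List.replicate_succ, List.cons_append]
    simp only [pvBuildRuns]
    rw [ih]
    rw [show i + 1 + (k : Int) = i + ((k + 1 : Nat) : Int) from by push_cast; ring]
    rw [show l + 1 + (k : Int) = l + ((k + 1 : Nat) : Int) from by push_cast; ring]
    simp

-- B's run builder agrees with the run-at-a-time encoding
lemma build_runs : ∀ (n : Nat) (xs : List Char), xs.length ≤ n →
    ∀ (c : Char) (i st l : Int) (acc : List (Int × Int)),
    pvBuildRuns xs (some c) i ((st, l) :: acc)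
      = acc.reverse ++ (st, l + (pvSpanRun c xs 1).1 - 1)
          :: pvRunsAux (pvSpanRun c xs 1).2 (i + (pvSpanRun c xs 1).1 - 1) := by
  intro n
  induction n with
  | zero =>
    intro xs hlen c i st l acc
    have hxs : xs = [] := List.eq_nil_of_length_eq_zero (Nat.le_zero.mp hlen)
    subst hxs
    have h1 : pvSpanRun c ([] : List Char) 1 = (1, ([] : List Char)) := rfl
    rw [h1]
    dsimp only
    rw [show l + 1 - 1 = l from by ring, show i + 1 - 1 = i from by ring]
    rw [pvRunsAux]
    simp [pvBuildRuns]
  | succ m ih =>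
    intro xs hlen c i st l acc
    obtain ⟨k, rest', hspan, hxs, hhead⟩ := pvSpanRun_spec c xs 1
    have hlen' : xs.length = k + rest'.length := by rw [hxs]; simp
    rw [hspan]
    dsimp only
    rw [hxs, build_ext c k]
    rcases hhead with h0 | ⟨y, ys, h0, hy⟩
    · subst h0
      rw [show l + (1 + (k : Int)) - 1 = l + (k : Int) from by ring,
        show i + (1 + (k : Int)) - 1 = i + (k : Int) from by ring]
      rw [pvRunsAux]
      simp [pvBuildRuns]
    · subst h0
      have hyc : ¬ (some y = some c) := by simpa using hy
      simp only [pvBuildRuns, if_neg hyc]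
      have hys : ys.length ≤ m := by
        simp only [List.length_cons] at hlen'; omega
      rw [ih ys hys y (i + (k : Int) + 1) (i + (k : Int)) 1 ((st, l + (k : Int)) :: acc)]
      rw [pvRunsAux]
      rw [show (1 : Int) + (pvSpanRun y ys 1).1 - 1 = (pvSpanRun y ys 1).1 from by ring]
      rw [show i + (k : Int) + 1 + (pvSpanRun y ys 1).1 - 1
            = i + (k : Int) + (pvSpanRun y ys 1).1 from by ring]
      rw [show l + (1 + (k : Int)) - 1 = l + (k : Int) from by ring]
      rw [show i + (1 + (k : Int)) - 1 = i + (k : Int) from by ring]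
      simp [List.reverse_cons, List.append_assoc]

lemma build_eq_runsAux (cs : List Char) : pvBuildRuns cs none 0 [] = pvRunsAux cs 0 := by
  cases cs with
  | nil => rw [pvRunsAux]; simp [pvBuildRuns]
  | cons c0 rest =>
    have h0 : ¬ (some c0 = (none : Option Char)) := by simp
    simp only [pvBuildRuns, if_neg h0]
    rw [show (0 : Int) + 1 = 1 from by norm_num]
    rw [build_runs rest.length rest le_rfl c0 1 0 1 []]
    rw [pvRunsAux]
    rw [show (1 : Int) + (pvSpanRun c0 rest 1).1 - 1 = (pvSpanRun c0 rest 1).1 from by ring]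
    rw [show (0 : Int) + (pvSpanRun c0 rest 1).1 = (pvSpanRun c0 rest 1).1 from by ring]
    simp

-- one loop step of A on a differing character: update (start,maxLen), reset c/count
lemma loopA_change (y c : Char) (hy : ¬ y = c) (ys : List Char) (curr : Int) (M : Int × Int)
    (e cnt : Int) :
    longestSubsLoopA (y :: ys) curr c cnt M.2 M.1 e
      = longestSubsLoopA ys curr y 1 (upd M curr (e + 1 - curr)).2 (upd M curr (e + 1 - curr)).1
          (e + 1) := by
  simp only [longestSubsLoopA, if_neg hy]
  rw [show e - curr + 1 = e + 1 - curr from by ring]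
  unfold upd
  split_ifs <;> rfl

-- one loop step of A on the second character of a run: update (start,maxLen), count := 2
lemma loopA_two (c : Char) (ys : List Char) (curr : Int) (M : Int × Int) (e : Int) :
    longestSubsLoopA (c :: ys) curr c 1 M.2 M.1 e
      = longestSubsLoopA ys curr c 2 (upd M curr (e + 1 - curr)).2 (upd M curr (e + 1 - curr)).1
          (e + 1) := by
  simp only [longestSubsLoopA, show (1:Int) + 1 = 2 from by norm_num]
  rw [show e - curr + 1 = e + 1 - curr from by ring]
  unfold upd
  split_ifs <;> rfl

lemma loopA_nil (curr : Int) (c : Char) (cnt : Int) (M : Int × Int) (e : Int) :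
    longestSubsLoopA [] curr c cnt M.2 M.1 e = M := by
  simp [longestSubsLoopA]

-- A's loop across the tail of a run once count ≥ 2: each step only moves curr/count
lemma loopA_rep (c : Char) : ∀ (k : Nat) (rest : List Char) (curr cnt ml st e : Int),
    2 ≤ cnt →
    longestSubsLoopA (List.replicate k c ++ rest) curr c cnt ml st e
      = longestSubsLoopA rest (if k = 0 then curr else e + (k : Int) - 2) c (cnt + k) ml st
          (e + k) := by
  intro k
  induction k with
  | zero => intro rest curr cnt ml st e _; simp
  | succ k ih =>
    intro rest curr cnt ml st e hc
    rw [List.replicate_succ, List.cons_append]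
    simp only [longestSubsLoopA, if_neg (show ¬ cnt + 1 = 2 from by omega)]
    rw [ih rest (e - 1) (cnt + 1) ml st (e + 1) (by omega)]
    rw [if_neg (Nat.succ_ne_zero k)]
    rw [show (if k = 0 then e - 1 else e + 1 + (k : Int) - 2) = e + ((k + 1 : Nat) : Int) - 2 from by
      by_cases hk : k = 0 <;> simp [hk] <;> push_cast <;> ring]
    rw [show cnt + 1 + (k : Int) = cnt + ((k + 1 : Nat) : Int) from by push_cast; ring]
    rw [show e + 1 + (k : Int) = e + ((k + 1 : Nat) : Int) from by push_cast; ring]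
    simp

lemma scan_short (p l seg st ml : Int) (rs : List (Int × Int)) (h : ¬ 3 ≤ l) :
    pvScanRuns ((p, l) :: rs) seg st ml = pvScanRuns rs seg st ml := by
  simp [pvScanRuns, h]

lemma scan_long (p l seg st ml : Int) (rs : List (Int × Int)) (h : 3 ≤ l) :
    pvScanRuns ((p, l) :: rs) seg st ml
      = pvScanRuns rs (p + l - 2) (upd (st, ml) seg (p + 2 - seg)).1
          (upd (st, ml) seg (p + 2 - seg)).2 := by
  simp only [pvScanRuns, if_pos h]
  unfold upd
  split_ifs <;> rfl

-- Main invariant: entering a fresh run (first char c consumed, run start p, window start seg),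
-- A's (start, maxLen) is B's state updated with the strict-improvement candidate for the
-- current window prefix; the segment-final update absorbs all of A's intermediate updates.
lemma loopA_runs : ∀ (n : Nat) (xs : List Char), xs.length ≤ n →
    ∀ (c : Char) (p seg stB mlB : Int), seg ≤ p → 1 ≤ mlB →
    longestSubsLoopA xs seg c 1 (upd (stB, mlB) seg (p + 1 - seg)).2
        (upd (stB, mlB) seg (p + 1 - seg)).1 (p + 1)
      = finalUpd (pvScanRuns (pvRunsAux (c :: xs) p) seg stB mlB) (p + 1 + xs.length) := by
  intro n
  induction n with
  | zero =>
    intro xs hlen c p seg stB mlB hsp hml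
    have hxs : xs = [] := List.eq_nil_of_length_eq_zero (Nat.le_zero.mp hlen)
    subst hxs
    rw [pvRunsAux]
    simp [longestSubsLoopA, pvSpanRun, pvRunsAux, pvScanRuns, finalUpd]
  | succ m ih =>
    intro xs hlen c p seg stB mlB hsp hml
    obtain ⟨k, rest', hspan, hxs, hhead⟩ := pvSpanRun_spec c xs 1
    have hlen' : xs.length = k + rest'.length := by rw [hxs]; simp
    have hruns : pvRunsAux (c :: xs) p
        = (p, 1 + (k : Int)) :: pvRunsAux rest' (p + (1 + (k : Int))) := by
      rw [pvRunsAux, hspan]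
    rw [hruns, hxs]
    rcases Nat.eq_zero_or_pos k with hk | hkpos
    · -- run of length 1 (the next char differs, or the string ends)
      subst hk
      rw [scan_short _ _ _ _ _ _ (by norm_num)]
      simp only [List.replicate_zero, List.nil_append, Nat.cast_zero, add_zero]
      rcases hhead with h0 | ⟨y, ys, h0, hy⟩
      · subst h0
        rw [pvRunsAux]
        simp [pvScanRuns, finalUpd, loopA_nil]
      · subst h0
        rw [loopA_change y c hy ys seg _ (p + 1) 1]
        rw [show p + 1 + 1 - seg = p + 2 - seg from by ring,
          upd_upd _ _ _ _ (by omega : p + 1 - seg ≤ p + 2 - seg)]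
        have hys : ys.length ≤ m := by
          simp only [List.length_cons] at hlen'; omega
        have h2 := ih ys hys y (p + 1) seg stB mlB (by omega) hml
        rw [show p + 1 + 1 - seg = p + 2 - seg from by ring] at h2
        rw [show p + 1 + 1 = p + 1 + 1 from rfl] at h2
        rw [h2]
        simp only [List.length_cons]
        push_cast
        ring_nf
    · obtain ⟨k', rfl⟩ : ∃ k', k = k' + 1 := ⟨k - 1, by omega⟩
      rw [List.replicate_succ, List.cons_append]
      rw [loopA_two c _ seg _ (p + 1)]
      rw [show p + 1 + 1 - seg = p + 2 - seg from by ring,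
        upd_upd _ _ _ _ (by omega : p + 1 - seg ≤ p + 2 - seg)]
      rw [show p + 1 + 1 = p + 2 from by ring]
      rw [loopA_rep c k' rest' seg 2 _ _ (p + 2) (by norm_num)]
      have hQ2 : 2 ≤ (upd (stB, mlB) seg (p + 2 - seg)).2 :=
        le_trans (by omega) (upd_snd_ge (stB, mlB) seg (p + 2 - seg)).2
      rcases Nat.eq_zero_or_pos k' with hk' | hk'pos
      · -- run of length 2: still a short run, B's scan skips it
        subst hk'
        rw [scan_short _ _ _ _ _ _ (by norm_num)]
        simp only [if_true, Nat.cast_zero, add_zero]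
        rcases hhead with h0 | ⟨y, ys, h0, hy⟩
        · subst h0
          rw [pvRunsAux]
          simp only [pvScanRuns, finalUpd, loopA_nil]
          congr 1
          simp
          ring
        · subst h0
          rw [loopA_change y c hy ys seg _ (p + 2) 2]
          rw [show p + 2 + 1 - seg = p + 3 - seg from by ring,
            upd_upd _ _ _ _ (by omega : p + 2 - seg ≤ p + 3 - seg)]
          have hys : ys.length ≤ m := by
            simp only [List.length_cons] at hlen'; omega
          have h2 := ih ys hys y (p + 2) seg stB mlB (by omega) hml
          rw [show p + 2 + 1 - seg = p + 3 - seg from by ring] at h2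
          rw [h2]
          simp only [List.length_cons, List.length_append, List.length_replicate]
          push_cast
          ring_nf
      · -- run of length k' + 2 ≥ 3: a long run; B updates and restarts the segment
        obtain ⟨k'', rfl⟩ : ∃ k'', k' = k'' + 1 := ⟨k' - 1, by omega⟩
        rw [scan_long _ _ _ _ _ _ (by push_cast; omega)]
        rw [if_neg (Nat.succ_ne_zero k'')]
        rcases hhead with h0 | ⟨y, ys, h0, hy⟩
        · subst h0
          rw [pvRunsAux]
          simp only [pvScanRuns, finalUpd]
          rw [show p + 1 + ((c :: (List.replicate (k'' + 1) c ++ ([] : List Char))).length : Int)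
                - (p + (1 + ((k'' + 1 + 1 : Nat) : Int)) - 2) = 2 from by
            simp
            ring]
          rw [Prod.mk.eta, upd_id _ _ _ hQ2]
          simp [longestSubsLoopA]
        · subst h0
          rw [loopA_change y c hy ys _ _ (p + 2 + ((k'' + 1 : Nat) : Int)) _]
          rw [show p + 2 + ((k'' + 1 : Nat) : Int) + 1 - (p + 2 + ((k'' + 1 : Nat) : Int) - 2)
              = 3 from by ring]
          have hys : ys.length ≤ m := by
            simp only [List.length_cons] at hlen'; omega
          have h2 := ih ys hys y (p + 2 + ((k'' + 1 : Nat) : Int))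
            (p + 2 + ((k'' + 1 : Nat) : Int) - 2)
            (upd (stB, mlB) seg (p + 2 - seg)).1 (upd (stB, mlB) seg (p + 2 - seg)).2
            (by omega) (by omega)
          rw [show p + 2 + ((k'' + 1 : Nat) : Int) + 1 - (p + 2 + ((k'' + 1 : Nat) : Int) - 2)
              = 3 from by ring] at h2
          simp only [Prod.mk.eta] at h2
          rw [h2]
          simp only [List.length_cons, List.length_append, List.length_replicate]
          push_cast
          ring_nf

-- ===== VERDICT (by name: the statement is the Claim_ definition above) =====
theorem longestSubs_spec : Claim_equal_longestSubs := by
  intro s _ hp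
  unfold Spec_longestSubs
  cases h : s.toList with
  | nil =>
    exact absurd (String.toList_eq_nil_iff.mp h) hp
  | cons c0 rest =>
    have hA := loopA_runs rest.length rest le_rfl c0 0 0 0 1 le_rfl (by norm_num)
    rw [show upd (0, 1) 0 (0 + 1 - 0) = ((0 : Int), (1 : Int)) from by norm_num [upd]] at hA
    norm_num at hA
    simp only [longestSubs, longestSubs_alt, h]
    rw [build_eq_runsAux]
    rw [hA]
    have hB : (finalUpd (pvScanRuns (pvRunsAux (c0 :: rest) 0) 0 0 1)
        (((c0 :: rest).length : Int)))
        = (let r := pvScanRuns (pvRunsAux (c0 :: rest) 0) 0 0 1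
           if ((c0 :: rest).length : Int) - r.1 > r.2.2
           then (r.1, ((c0 :: rest).length : Int) - r.1) else (r.2.1, r.2.2)) := rfl
    rw [show (1 : Int) + (rest.length : Int) = ((c0 :: rest).length : Int) from by
      simp; ring]
    rw [hB]
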